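-- pv_equiv track=rewrite | github.com/siddhant-vij/helloPython | functions.py | xyz_checker
-- ===== SOURCE A (Python) =====
-- def xyz_checker(str):
--     idx = 0
--     while idx < len(str) - 2:
--         if idx == 0 and str[0:3] == "xyz":
--             return True
--         if idx != 0 and str[idx : idx + 3] == "xyz" and str[idx - 1] != ".":
--             return True
--         idx += 1
--     return False
-- ===== SOURCE B (Python) =====
-- def xyz_checker(str):
--     # single-pass DFA: state = chars of "xyz" matched so far (for a match whose
--     # start was not preceded by '.'); armed = previous char was not '.'
--     armed = True
--     state = 0
--     for ch in str:
--         if ch == "x":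
--             state = 1 if armed else 0
--         elif ch == "y" and state == 1:
--             state = 2
--         elif ch == "z" and state == 2:
--             return True
--         else:
--             state = 0
--         armed = ch != "."
--     return False
-- ===== Notes on version B (the rewrite author's own statement) =====
-- stated objective: faster
-- what changed: Replaces A's index scan that extracts and compares a fresh 3-character slice at every position with a single-pass finite state machine over the characters that maintains match progress (0/1/2 chars of the token seen) plus a flag recording whether the previous character was a dot, so no slicing or position arithmetic happens at all.
import Mathlib
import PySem

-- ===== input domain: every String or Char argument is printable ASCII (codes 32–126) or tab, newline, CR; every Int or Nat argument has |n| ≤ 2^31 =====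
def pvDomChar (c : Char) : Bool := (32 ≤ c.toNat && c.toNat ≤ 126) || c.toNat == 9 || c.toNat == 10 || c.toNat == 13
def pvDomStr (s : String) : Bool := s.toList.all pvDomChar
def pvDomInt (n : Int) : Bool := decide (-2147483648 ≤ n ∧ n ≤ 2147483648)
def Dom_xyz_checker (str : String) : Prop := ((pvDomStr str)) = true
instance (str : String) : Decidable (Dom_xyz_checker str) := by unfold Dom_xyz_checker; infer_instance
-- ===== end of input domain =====

-- B replaces A's position-by-position 3-character slice comparison with a single-pass
-- finite state machine over the characters (match progress 0/1/2 plus a not-after-dot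
-- flag); a genuinely different algorithm of the same cost, proved to agree on every string.

-- ===== PORT A =====
-- literal port of A's while loop: idx scans every position, comparing the 3-char slice there
def xyzLoopA (l : List Char) (idx : Nat) : Bool :=
  if idx + 2 < l.length then
    if idx = 0 ∧ PySem.List.slice l (some ((0 : Nat) : Int)) (some ((3 : Nat) : Int)) = ['x', 'y', 'z'] then true
    else if idx ≠ 0 ∧ PySem.List.slice l (some (idx : Int)) (some ((idx : Int) + 3)) = ['x', 'y', 'z'] ∧
        PySem.List.pyGet? l ((idx : Int) - 1) ≠ some '.' then true
    else xyzLoopA l (idx + 1)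
  else false
termination_by l.length - idx

def xyz_checker (str : String) : Bool := xyzLoopA str.toList 0

-- ===== PORT B =====
-- literal port of Source B's for loop: state = chars of "xyz" matched so far (for a match
-- whose start was not after '.'), armed = previous char was not '.'; early return on 'z'.
def xyzLoopB : List Char → Bool → Nat → Bool
  | [], _, _ => false
  | c :: rest, armed, state =>
    if c = 'x' then xyzLoopB rest (decide (c ≠ '.')) (if armed then 1 else 0)
    else if c = 'y' ∧ state = 1 then xyzLoopB rest (decide (c ≠ '.')) 2
    else if c = 'z' ∧ state = 2 then true
    else xyzLoopB rest (decide (c ≠ '.')) 0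

def xyz_checker_alt (str : String) : Bool := xyzLoopB str.toList true 0

-- ===== PRECONDITION & SPEC =====
def Spec_xyz_checker (str : String) (out : Bool) : Prop := out = xyz_checker_alt str
instance (str : String) (out : Bool) : Decidable (Spec_xyz_checker str out) := by unfold Spec_xyz_checker; infer_instance

-- ===== CLAIM =====
def Claim_equal_xyz_checker : Prop := ∀ (str : String), Dom_xyz_checker str → Spec_xyz_checker str (xyz_checker str)

-- ===== LEMMAS AND PROOFS =====

-- the common characterisation: a hit at position i = "xyz" starts at i and i is not preceded by '.'
def XyzHit (l : List Char) (i : Nat) : Prop :=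
  ['x', 'y', 'z'] <+: l.drop i ∧ (i = 0 ∨ l[i - 1]? ≠ some '.')

theorem xyzHit_length {l : List Char} {i : Nat} (h : XyzHit l i) : i + 3 ≤ l.length := by
  have := h.1.length_le
  simp [List.length_drop] at this
  omega

theorem slice_window_iff (l : List Char) (idx : Nat) :
    PySem.List.slice l (some (idx : Int)) (some ((idx : Int) + 3)) = ['x', 'y', 'z'] ↔
      ['x', 'y', 'z'] <+: l.drop idx := by
  have hc : ((idx : Int) + 3) = ((idx + 3 : Nat) : Int) := by omega
  rw [hc, PySem.List.slice_natCast]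
  have h3 : idx + 3 - idx = 3 := by omega
  rw [h3]
  constructor
  · intro h
    exact List.prefix_iff_eq_take.mpr h.symm
  · intro h
    exact (List.prefix_iff_eq_take.mp h).symm

theorem slice03_iff (l : List Char) :
    PySem.List.slice l (some ((0 : Nat) : Int)) (some ((3 : Nat) : Int)) = ['x', 'y', 'z'] ↔
      ['x', 'y', 'z'] <+: l := by
  rw [PySem.List.slice_natCast]
  simp only [List.drop_zero, Nat.sub_zero]
  constructor
  · intro h
    exact List.prefix_iff_eq_take.mpr h.symm
  · intro h
    exact (List.prefix_iff_eq_take.mp h).symm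

-- A's two if-branches at position idx, taken together, test exactly XyzHit l idx
theorem xyzHit_iff_cond (l : List Char) (idx : Nat) :
    XyzHit l idx ↔
      ((idx = 0 ∧ PySem.List.slice l (some ((0 : Nat) : Int)) (some ((3 : Nat) : Int)) = ['x', 'y', 'z']) ∨
       (idx ≠ 0 ∧ PySem.List.slice l (some (idx : Int)) (some ((idx : Int) + 3)) = ['x', 'y', 'z'] ∧
         PySem.List.pyGet? l ((idx : Int) - 1) ≠ some '.')) := by
  have hc1 : idx ≠ 0 → ((idx : Int) - 1) = ((idx - 1 : Nat) : Int) := by omega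
  constructor
  · rintro ⟨hw, hp⟩
    by_cases h0 : idx = 0
    · subst h0
      exact Or.inl ⟨rfl, (slice03_iff l).mpr (by simpa using hw)⟩
    · refine Or.inr ⟨h0, (slice_window_iff l idx).mpr hw, ?_⟩
      rw [hc1 h0, PySem.List.pyGet?_natCast]
      rcases hp with h | h
      · exact absurd h h0
      · exact h
  · rintro (⟨h0, hs⟩ | ⟨h0, hs, hd⟩)
    · subst h0
      exact ⟨by simpa using (slice03_iff l).mp hs, Or.inl rfl⟩
    · refine ⟨(slice_window_iff l idx).mp hs, Or.inr ?_⟩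
      rwa [hc1 h0, PySem.List.pyGet?_natCast] at hd

theorem loopA_iff (l : List Char) (idx : Nat) :
    xyzLoopA l idx = true ↔ ∃ i, idx ≤ i ∧ XyzHit l i := by
  have main : ∀ (n idx : Nat), l.length - idx ≤ n →
      (xyzLoopA l idx = true ↔ ∃ i, idx ≤ i ∧ XyzHit l i) := by
    intro n
    induction n with
    | zero =>
      intro idx h
      rw [xyzLoopA, if_neg (by omega)]
      refine iff_of_false (by simp) ?_
      rintro ⟨i, hi, hhit⟩
      have := xyzHit_length hhit
      omega
    | succ n ih =>
      intro idx h
      rw [xyzLoopA]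
      by_cases hlt : idx + 2 < l.length
      · rw [if_pos hlt]
        by_cases hb1 : idx = 0 ∧ PySem.List.slice l (some ((0 : Nat) : Int)) (some ((3 : Nat) : Int)) = ['x', 'y', 'z']
        · rw [if_pos hb1]
          exact iff_of_true rfl ⟨idx, le_refl idx, (xyzHit_iff_cond l idx).mpr (Or.inl hb1)⟩
        · rw [if_neg hb1]
          by_cases hb2 : idx ≠ 0 ∧ PySem.List.slice l (some (idx : Int)) (some ((idx : Int) + 3)) = ['x', 'y', 'z'] ∧
              PySem.List.pyGet? l ((idx : Int) - 1) ≠ some '.'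
          · rw [if_pos hb2]
            exact iff_of_true rfl ⟨idx, le_refl idx, (xyzHit_iff_cond l idx).mpr (Or.inr hb2)⟩
          · rw [if_neg hb2, ih (idx + 1) (by omega)]
            constructor
            · rintro ⟨i, hi, hhit⟩
              exact ⟨i, by omega, hhit⟩
            · rintro ⟨i, hi, hhit⟩
              rcases Nat.eq_or_lt_of_le hi with heq | hlt2
              · exfalso
                rcases (xyzHit_iff_cond l i).mp hhit with hcnd | hcnd
                · exact hb1 (heq ▸ hcnd)
                · exact hb2 (heq ▸ hcnd)
              · exact ⟨i, hlt2, hhit⟩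
      · rw [if_neg hlt]
        refine iff_of_false (by simp) ?_
        rintro ⟨i, hi, hhit⟩
        have := xyzHit_length hhit
        omega
  exact main (l.length - idx) idx (le_refl _)

-- B's invariant pieces: a start position i is "ok" when it is not right after '.'
-- (position 0 is ok exactly when the machine is armed)
def OkStart (l : List Char) (armed : Bool) (i : Nat) : Prop :=
  match i with
  | 0 => armed = true
  | j + 1 => l[j]? ≠ some '.'

-- what xyzLoopB l armed state computes: a pending partial match completes in l,
-- or a fresh ok-started full match occurs somewhere in l
def LoopBGoal (l : List Char) (armed : Bool) (state : Nat) : Prop :=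
  (state = 1 ∧ ['y', 'z'] <+: l) ∨ (state = 2 ∧ ['z'] <+: l) ∨
    (∃ i, ['x', 'y', 'z'] <+: l.drop i ∧ OkStart l armed i)

-- shifting the fresh-match part of the invariant across one consumed character
theorem okExists_cons (c : Char) (rest : List Char) (armed : Bool) (p : List Char) :
    (∃ i, p <+: (c :: rest).drop i ∧ OkStart (c :: rest) armed i) ↔
      ((armed = true ∧ p <+: c :: rest) ∨
       (∃ j, p <+: rest.drop j ∧ OkStart rest (decide (c ≠ '.')) j)) := by
  constructor
  · rintro ⟨i, hp, hok⟩
    match i with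
    | 0 => exact Or.inl ⟨hok, by simpa using hp⟩
    | j + 1 =>
      refine Or.inr ⟨j, by simpa using hp, ?_⟩
      match j with
      | 0 =>
        simp only [OkStart] at hok ⊢
        simp only [List.getElem?_cons_zero] at hok
        simpa using fun h => hok (by simp [h])
      | k + 1 =>
        simpa only [OkStart, List.getElem?_cons_succ] using hok
  · rintro (⟨ha, hp⟩ | ⟨j, hp, hok⟩)
    · exact ⟨0, by simpa using hp, ha⟩
    · refine ⟨j + 1, by simpa using hp, ?_⟩
      match j with
      | 0 =>
        simp only [OkStart] at hok ⊢
        simp only [List.getElem?_cons_zero]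
        intro h
        simp only [Option.some_inj] at h
        simp [h] at hok
      | k + 1 =>
        simpa only [OkStart, List.getElem?_cons_succ] using hok

theorem loopB_iff (l : List Char) (armed : Bool) (state : Nat) :
    xyzLoopB l armed state = true ↔ LoopBGoal l armed state := by
  induction l generalizing armed state with
  | nil =>
    rw [xyzLoopB]
    refine iff_of_false (by simp) ?_
    rintro (⟨_, hp⟩ | ⟨_, hp⟩ | ⟨i, hp, _⟩) <;> simp_all [List.prefix_nil]
  | cons c rest ih =>
    rw [xyzLoopB]
    by_cases hx : c = 'x'
    · rw [if_pos hx, ih]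
      subst hx
      unfold LoopBGoal
      rw [okExists_cons]
      constructor
      · rintro (⟨hs, hp⟩ | ⟨hs, hp⟩ | h)
        · split at hs
          · refine Or.inr <| Or.inr <| Or.inl ⟨by assumption, ?_⟩
            exact List.cons_prefix_cons.mpr ⟨rfl, hp⟩
          · omega
        · split at hs <;> omega
        · exact Or.inr (Or.inr (Or.inr h))
      · rintro (⟨hs, hp⟩ | ⟨hs, hp⟩ | ⟨ha, hp⟩ | h)
        · exact absurd (List.cons_prefix_cons.mp hp).1 (by decide)
        · exact absurd (List.cons_prefix_cons.mp hp).1 (by decide)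
        · exact Or.inl ⟨by simp [ha], (List.cons_prefix_cons.mp hp).2⟩
        · exact Or.inr (Or.inr h)
    · rw [if_neg hx]
      by_cases hy : c = 'y' ∧ state = 1
      · rw [if_pos hy, ih]
        obtain ⟨hc, hst⟩ := hy
        subst hc hst
        unfold LoopBGoal
        rw [okExists_cons]
        constructor
        · rintro (⟨hs, hp⟩ | ⟨_, hp⟩ | h)
          · omega
          · exact Or.inl ⟨rfl, List.cons_prefix_cons.mpr ⟨rfl, hp⟩⟩
          · exact Or.inr (Or.inr (Or.inr h))
        · rintro (⟨_, hp⟩ | ⟨hs, hp⟩ | ⟨_, hp⟩ | h)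
          · exact Or.inr (Or.inl ⟨rfl, (List.cons_prefix_cons.mp hp).2⟩)
          · omega
          · exact absurd (List.cons_prefix_cons.mp hp).1.symm hx
          · exact Or.inr (Or.inr h)
      · rw [if_neg hy]
        by_cases hz : c = 'z' ∧ state = 2
        · rw [if_pos hz]
          obtain ⟨hc, hst⟩ := hz
          subst hc hst
          exact iff_of_true rfl (Or.inr (Or.inl ⟨rfl, List.cons_prefix_cons.mpr ⟨rfl, List.nil_prefix⟩⟩))
        · rw [if_neg hz, ih]
          unfold LoopBGoal
          rw [okExists_cons]
          constructor
          · rintro (⟨hs, hp⟩ | ⟨hs, hp⟩ | h)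
            · omega
            · omega
            · exact Or.inr (Or.inr (Or.inr h))
          · rintro (⟨hs, hp⟩ | ⟨hs, hp⟩ | ⟨_, hp⟩ | h)
            · exact absurd ⟨(List.cons_prefix_cons.mp hp).1.symm, hs⟩ hy
            · exact absurd ⟨(List.cons_prefix_cons.mp hp).1.symm, hs⟩ hz
            · exact absurd (List.cons_prefix_cons.mp hp).1.symm hx
            · exact Or.inr (Or.inr h)

-- at the top level (armed, state 0) B's invariant is exactly "some hit exists"
theorem okStart_true_iff (l : List Char) (i : Nat)
    (hp : ['x', 'y', 'z'] <+: l.drop i) :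
    OkStart l true i ↔ (i = 0 ∨ l[i - 1]? ≠ some '.') := by
  match i with
  | 0 => simp [OkStart]
  | j + 1 => simp [OkStart]

-- ===== VERDICT (by name: the statement is the Claim_ definition above) =====
theorem xyz_checker_spec : Claim_equal_xyz_checker := by
  intro s _
  unfold Spec_xyz_checker xyz_checker xyz_checker_alt
  rw [Bool.eq_iff_iff, loopA_iff, loopB_iff]
  unfold LoopBGoal
  constructor
  · rintro ⟨i, _, hp, hok⟩
    exact Or.inr (Or.inr ⟨i, hp, (okStart_true_iff _ i hp).mpr hok⟩)
  · rintro (⟨hs, _⟩ | ⟨hs, _⟩ | ⟨i, hp, hok⟩)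
    · omega
    · omega
    · exact ⟨i, Nat.zero_le i, hp, (okStart_true_iff _ i hp).mp hok⟩
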